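-- pv_equiv track=rewrite | github.com/kimdy003/Python_study | 4_etc/webtoon/1.py | solution
-- ===== SOURCE A (Python) =====
-- def solution(lottery):
--     answer, cnt = 0, 0
--     dict = {}
--     for lot in lottery:
--         dict[lot[0]] = dict.get(lot[0], []) + [lot[1]]
--
--     for key in dict:
--         lst = dict[key]
--         if max(lst) == 1:
--             cnt += 1
--             answer += lst.index(max(lst)) + 1
--
--     return answer // cnt if cnt != 0 else 0
-- ===== SOURCE B (Python) =====
-- def solution(lottery):
--     # One pass: per key keep (count_seen, running_max, index_of_first_1).
--     stats = {}
--     for lot in lottery: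
--         k, v = lot[0], lot[1]
--         c, mx, first_one = stats.get(k, (0, None, None))
--         stats[k] = (c + 1,
--                     v if mx is None or v > mx else mx,
--                     c if first_one is None and v == 1 else first_one)
--     answer = cnt = 0
--     for c, mx, first_one in stats.values():
--         if mx == 1:
--             cnt += 1
--             answer += first_one + 1
--     return answer // cnt if cnt != 0 else 0
-- ===== Notes on version B (the rewrite author's own statement) =====
-- stated objective: alternative
-- what changed: Instead of grouping all values into per-key lists and then re-scanning each list with max() (twice) and list.index(), B keeps per key only a constant-size record (count, running max, index of first 1) updated in the single grouping pass, so the second phase reads records without rescanning any list.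
import Mathlib
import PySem

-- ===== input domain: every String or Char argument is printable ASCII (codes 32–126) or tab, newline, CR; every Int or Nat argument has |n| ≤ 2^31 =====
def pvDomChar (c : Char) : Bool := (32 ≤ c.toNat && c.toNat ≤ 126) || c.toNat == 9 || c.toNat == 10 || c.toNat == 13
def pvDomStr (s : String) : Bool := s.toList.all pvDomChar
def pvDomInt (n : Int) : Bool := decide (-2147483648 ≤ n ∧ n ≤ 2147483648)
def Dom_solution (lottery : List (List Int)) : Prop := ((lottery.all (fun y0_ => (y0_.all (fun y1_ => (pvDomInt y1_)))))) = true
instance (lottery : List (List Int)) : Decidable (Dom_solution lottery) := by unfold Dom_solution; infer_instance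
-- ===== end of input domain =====

-- B replaces A's per-key value lists (rescanned with max()/max()/index()) by a constant-size
-- per-key record (count, running max, first index of a 1) filled in the single grouping pass.

-- shared by both ports: lot[0] and lot[1]; the default is unreachable under Pre_solution
def pvKey (lot : List Int) : Int := (PySem.List.pyGet? lot 0).getD 0
def pvVal (lot : List Int) : Int := (PySem.List.pyGet? lot 1).getD 0

-- ===== PORT A =====
-- dict[lot[0]] = dict.get(lot[0], []) + [lot[1]]
def pvInsA (d : PySem.Dict Int (List Int)) (lot : List Int) : PySem.Dict Int (List Int) :=
  d.insert (pvKey lot) (d.getD (pvKey lot) [] ++ [pvVal lot])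

-- body of A's second loop; max(lst) is nonempty for every key of d, so the .getD 0 defaults
-- after max?/index? are unreachable
def pvStepA (d : PySem.Dict Int (List Int)) (ac : Int × Int) (key : Int) : Int × Int :=
  let lst := d.getD key []
  if (PySem.List.max? lst (fun y => y)).getD 0 == 1 then
    (ac.1 + (((PySem.List.index? lst ((PySem.List.max? lst (fun y => y)).getD 0)).getD 0 : Nat) : Int) + 1,
     ac.2 + 1)
  else ac

def solution (lottery : List (List Int)) : Int :=
  let d := lottery.foldl pvInsA PySem.Dict.empty
  let ac := d.keys.foldl (pvStepA d) ((0 : Int), (0 : Int))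
  if ac.2 ≠ 0 then PySem.Int.floordiv ac.1 ac.2 else 0

-- ===== PORT B =====
-- one record update: (count, running max as Option (None before first value), first index of a 1)
def pvStep (st : Int × Option Int × Option Int) (v : Int) : Int × Option Int × Option Int :=
  (st.1 + 1,
   some (match st.2.1 with
         | none => v
         | some m => if v > m then v else m),
   if st.2.2.isNone && v == 1 then some st.1 else st.2.2)

def pvInsB (d : PySem.Dict Int (Int × Option Int × Option Int)) (lot : List Int) :
    PySem.Dict Int (Int × Option Int × Option Int) :=
  d.insert (pvKey lot) (pvStep (d.getD (pvKey lot) (0, none, none)) (pvVal lot))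

-- body of B's second loop; a key whose max is 1 has seen a 1, so first_one's .getD 0 is unreachable
def pvStepB (ac : Int × Int) (st : Int × Option Int × Option Int) : Int × Int :=
  if st.2.1 == some 1 then (ac.1 + (st.2.2.getD 0 + 1), ac.2 + 1) else ac

def solution_alt (lottery : List (List Int)) : Int :=
  let stats := lottery.foldl pvInsB PySem.Dict.empty
  let ac := stats.values.foldl pvStepB ((0 : Int), (0 : Int))
  if ac.2 ≠ 0 then PySem.Int.floordiv ac.1 ac.2 else 0

-- ===== PRECONDITION & SPEC =====
-- Pre_ excludes exactly the inputs on which Python A raises IndexError: an inner list shorter than 2.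
def Pre_solution (lottery : List (List Int)) : Prop := ∀ lot ∈ lottery, 2 ≤ lot.length
instance (lottery : List (List Int)) : Decidable (Pre_solution lottery) := by
  unfold Pre_solution; infer_instance
def pvWitness_solution : List (List Int) := [[1, 1], [2, 0], [1, 0]]

def Spec_solution (lottery : List (List Int)) (out : Int) : Prop := out = solution_alt lottery
instance (lottery : List (List Int)) (out : Int) : Decidable (Spec_solution lottery out) := by
  unfold Spec_solution; infer_instance

-- ===== CLAIM (what is proved, stated in full; the proofs are below) =====
def Claim_equal_solution : Prop := ∀ (lottery : List (List Int)), Dom_solution lottery → Pre_solution lottery → Spec_solution lottery (solution lottery)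

-- ===== LEMMAS AND PROOFS =====

-- a grouping fold's entry at `key` is the fold of the per-key filtered sublist
theorem pv_getD_group {β : Type} (f : β → List Int → β) (z : β) :
    ∀ (l : List (List Int)) (d : PySem.Dict Int β) (key : Int),
      (l.foldl (fun d lot => d.insert (pvKey lot) (f (d.getD (pvKey lot) z) lot)) d).getD key z
        = (l.filter (fun lot => pvKey lot == key)).foldl f (d.getD key z) := by
  intro l
  induction l with
  | nil => intro d key; simp
  | cons a t ih =>
    intro d key
    simp only [List.foldl_cons, List.filter_cons]
    rw [ih]
    by_cases h : pvKey a = key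
    · subst h
      rw [PySem.Dict.getD_insert_self]
      simp
    · rw [PySem.Dict.getD_insert_of_ne _ _ _ (fun hc => h hc.symm)]
      have hb : (pvKey a == key) = false := by simp [h]
      simp [hb]

-- a fold that appends singletons is a map
theorem pv_foldl_append (t : List (List Int)) :
    ∀ (acc : List Int), t.foldl (fun b lot => b ++ [pvVal lot]) acc = acc ++ t.map pvVal := by
  induction t with
  | nil => intro acc; simp
  | cons a u ih => intro acc; simp [ih]

theorem pv_getD_A (l : List (List Int)) (key : Int) :
    (l.foldl pvInsA PySem.Dict.empty).getD key []
      = (l.filter (fun lot => pvKey lot == key)).map pvVal := by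
  have h := pv_getD_group (fun b lot => b ++ [pvVal lot]) [] l PySem.Dict.empty key
  rw [PySem.Dict.getD_empty] at h
  rw [show (l.foldl pvInsA PySem.Dict.empty).getD key []
        = (l.filter (fun lot => pvKey lot == key)).foldl (fun b lot => b ++ [pvVal lot]) [] from h]
  rw [pv_foldl_append]
  simp

theorem pv_getD_B (l : List (List Int)) (key : Int) :
    (l.foldl pvInsB PySem.Dict.empty).getD key ((0 : Int), (none : Option Int), (none : Option Int))
      = ((l.filter (fun lot => pvKey lot == key)).map pvVal).foldl pvStep
          ((0 : Int), (none : Option Int), (none : Option Int)) := by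
  have h := pv_getD_group (fun b lot => pvStep b (pvVal lot))
    ((0 : Int), (none : Option Int), (none : Option Int)) l PySem.Dict.empty key
  rw [PySem.Dict.getD_empty] at h
  rw [List.foldl_map]
  exact h

theorem pv_keys_A (l : List (List Int)) :
    (l.foldl pvInsA PySem.Dict.empty).keys = PySem.Set.ofList (l.map pvKey) := by
  have h := PySem.Dict.keys_foldl_insert_key l pvKey
    (fun d lot => d.getD (pvKey lot) [] ++ [pvVal lot]) PySem.Dict.empty
  rw [show (l.foldl pvInsA PySem.Dict.empty).keys
        = (l.foldl (fun d lot => d.insert (pvKey lot)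
            ((fun (d : PySem.Dict Int (List Int)) lot => d.getD (pvKey lot) [] ++ [pvVal lot]) d lot)) PySem.Dict.empty).keys from rfl]
  rw [h]
  simp [PySem.Set.update, PySem.Set.ofList_eq_foldl, PySem.Dict.keys_empty]

theorem pv_keys_B (l : List (List Int)) :
    (l.foldl pvInsB PySem.Dict.empty).keys = PySem.Set.ofList (l.map pvKey) := by
  have h := PySem.Dict.keys_foldl_insert_key l pvKey
    (fun d lot => pvStep (d.getD (pvKey lot) (0, none, none)) (pvVal lot)) PySem.Dict.empty
  rw [show (l.foldl pvInsB PySem.Dict.empty).keys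
        = (l.foldl (fun d lot => d.insert (pvKey lot)
            ((fun (d : PySem.Dict Int (Int × Option Int × Option Int)) lot =>
              pvStep (d.getD (pvKey lot) (0, none, none)) (pvVal lot)) d lot)) PySem.Dict.empty).keys from rfl]
  rw [h]
  simp [PySem.Set.update, PySem.Set.ofList_eq_foldl, PySem.Dict.keys_empty]

theorem pv_nodup_keys_B (l : List (List Int)) :
    (l.foldl pvInsB PySem.Dict.empty).keys.Nodup :=
  PySem.Dict.nodup_keys_foldl_insert_key l pvKey
    (fun d lot => pvStep (d.getD (pvKey lot) (0, none, none)) (pvVal lot)) PySem.Dict.empty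
    (by simp)

-- running-max with strict compare is max
theorem pv_if_gt_eq_max (a b : Int) : (if b > a then b else a) = max a b := by
  omega

-- characterisation of the record fold from a running state
theorem pv_rec_inv :
    ∀ (vs : List Int) (c m : Int) (fo : Option Int),
      vs.foldl pvStep (c, some m, fo)
        = (c + vs.length,
           some (vs.foldl max m),
           match fo with
           | some i => some i
           | none => (PySem.List.index? vs 1).map (fun i => c + (i : Int))) := by
  intro vs
  induction vs with
  | nil => intro c m fo; cases fo <;> simp [PySem.List.index?]
  | cons v t ih =>
    intro c m fo
    simp only [List.foldl_cons, pvStep, pv_if_gt_eq_max]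
    cases fo with
    | some i => simp [ih, List.length_cons]; omega
    | none =>
      by_cases hv : v = 1
      · subst hv
        rw [show (Option.isNone (none : Option Int) && (1 : Int) == 1) = true from rfl]
        simp only [if_pos]
        rw [ih]
        rw [PySem.List.index?_cons_self]
        simp [List.length_cons]; omega
      · have h1 : (Option.isNone (none : Option Int) && v == 1) = false := by simp [hv]
        rw [h1]
        simp only [Bool.false_eq_true, if_neg, not_false_iff]
        rw [ih]
        rw [PySem.List.index?_cons_of_ne t hv]
        cases hidx : PySem.List.index? t 1 with
        | none => simp [List.length_cons]; omega
        | some i =>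
          simp [List.length_cons]
          constructor
          · omega
          · omega

-- the per-key contribution of A equals the per-key contribution of B, for a nonempty value list
theorem pv_contrib (vs : List Int) (hvs : vs ≠ []) (ac : Int × Int) :
    (let lst := vs
     if (PySem.List.max? lst (fun y => y)).getD 0 == 1 then
       (ac.1 + (((PySem.List.index? lst ((PySem.List.max? lst (fun y => y)).getD 0)).getD 0 : Nat) : Int) + 1,
        ac.2 + 1)
     else ac)
      = pvStepB ac (vs.foldl pvStep ((0 : Int), (none : Option Int), (none : Option Int))) := by
  obtain ⟨x, t, rfl⟩ : ∃ x t, vs = x :: t := by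
    cases vs with
    | nil => exact absurd rfl hvs
    | cons x t => exact ⟨x, t, rfl⟩
  simp only [List.foldl_cons]
  have hstep : pvStep ((0 : Int), (none : Option Int), (none : Option Int)) x
      = (1, some x, if x = 1 then some 0 else none) := by
    simp only [pvStep]
    by_cases hx : x = 1 <;> simp [hx]
  rw [hstep, pv_rec_inv]
  rw [PySem.List.max?_id_cons]
  unfold pvStepB
  by_cases hmax : t.foldl max x = 1
  · simp only [hmax, Option.getD_some]
    have hmem : (1 : Int) ∈ x :: t := by
      have := PySem.List.max?_mem (xs := x :: t) (key := fun y => y)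
        (m := t.foldl max x) (by rw [PySem.List.max?_id_cons])
      rwa [hmax] at this
    by_cases hx : x = 1
    · subst hx
      rw [PySem.List.index?_cons_self]
      simp
    · have h1t : (1 : Int) ∈ t := by
        cases hmem with
        | head => exact absurd rfl hx
        | tail _ h => exact h
      obtain ⟨i, hi⟩ : ∃ i, PySem.List.index? t 1 = some i := by
        cases hidx : PySem.List.index? t 1 with
        | none => exact absurd h1t (by
            have := (PySem.List.index?_eq_none_iff t 1).mp hidx
            exact this)
        | some i => exact ⟨i, rfl⟩
      rw [PySem.List.index?_cons_of_ne t hx, hi]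
      simp [hx]
      omega
  · simp [hmax]

-- ===== VERDICT (by name: the statement is the Claim_ definition above) =====
theorem solution_spec : Claim_equal_solution := by
  intro lottery _hdom _hpre
  unfold Spec_solution solution solution_alt
  dsimp only
  have hndB : (lottery.foldl pvInsB PySem.Dict.empty).keys.Nodup := pv_nodup_keys_B lottery
  rw [PySem.Dict.values_eq_map_keys _ hndB ((0 : Int), (none : Option Int), (none : Option Int))]
  rw [List.foldl_map]
  rw [pv_keys_A, pv_keys_B]
  have hfold : (PySem.Set.ofList (lottery.map pvKey)).foldl
        (pvStepA (lottery.foldl pvInsA PySem.Dict.empty)) ((0 : Int), (0 : Int))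
      = (PySem.Set.ofList (lottery.map pvKey)).foldl
        (fun ac key => pvStepB ac
          ((lottery.foldl pvInsB PySem.Dict.empty).getD key ((0 : Int), (none : Option Int), (none : Option Int))))
        ((0 : Int), (0 : Int)) := by
    apply PySem.List.foldl_congr_mem
    intro ac key hkey
    have hkey' : key ∈ lottery.map pvKey := (PySem.Set.mem_ofList _ _).mp hkey
    have hne : (lottery.filter (fun lot => pvKey lot == key)).map pvVal ≠ [] := by
      obtain ⟨lot, hlot, hk⟩ := List.mem_map.mp hkey'
      intro hnil
      have hmem : lot ∈ lottery.filter (fun lot => pvKey lot == key) :=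
        List.mem_filter.mpr ⟨hlot, by simp [hk]⟩
      rw [List.map_eq_nil_iff] at hnil
      rw [hnil] at hmem
      simp at hmem
    unfold pvStepA
    rw [pv_getD_A, pv_getD_B]
    exact pv_contrib _ hne ac
  rw [hfold]
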